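-- pv_equiv track=rewrite | github.com/VibhuSahu/Python_Tutorial | day.py | find_substring_with_most_vowels
-- ===== SOURCE A (Python) =====
-- def find_substring_with_most_vowels(s, k):
--     vowels = set(['a', 'e', 'i', 'o', 'u'])
--     max_vowel_count = 0
--     max_vowel_substring = ""
--     vowel_count = 0
--     for i in range(len(s) - k + 1):
--         if i == 0:
--             for j in range(k):
--                 if s[j] in vowels:
--                     vowel_count += 1
--         else:
--             if s[i-1] in vowels:
--                 vowel_count -= 1
--             if s[i+k-1] in vowels:
--                 vowel_count += 1
--         if vowel_count > max_vowel_count: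
--             max_vowel_count = vowel_count
--             max_vowel_substring = s[i:i+k]
--     if max_vowel_count == 0:
--         return "Not found!"
--     else:
--         return max_vowel_substring
-- ===== SOURCE B (Python) =====
-- def find_substring_with_most_vowels(s, k):
--     vowels = ["a", "e", "i", "o", "u"]
--     best_count = 0
--     best_sub = ""
--     for i in range(len(s) - k + 1):
--         count = sum(1 for c in s[i:i+k] if c in vowels)
--         if count > best_count:
--             best_count = count
--             best_sub = s[i:i+k]
--     return best_sub if best_count > 0 else "Not found!"
-- ===== Notes on version B (the rewrite author's own statement) =====
-- stated objective: simpler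
-- what changed: Replaces the incremental sliding-window vowel counter (special-cased first window, add/subtract updates) with a plain per-window recount over the slice s[i:i+k]; Pre_ excludes k < 0, on which A raises IndexError.
import Mathlib
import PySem

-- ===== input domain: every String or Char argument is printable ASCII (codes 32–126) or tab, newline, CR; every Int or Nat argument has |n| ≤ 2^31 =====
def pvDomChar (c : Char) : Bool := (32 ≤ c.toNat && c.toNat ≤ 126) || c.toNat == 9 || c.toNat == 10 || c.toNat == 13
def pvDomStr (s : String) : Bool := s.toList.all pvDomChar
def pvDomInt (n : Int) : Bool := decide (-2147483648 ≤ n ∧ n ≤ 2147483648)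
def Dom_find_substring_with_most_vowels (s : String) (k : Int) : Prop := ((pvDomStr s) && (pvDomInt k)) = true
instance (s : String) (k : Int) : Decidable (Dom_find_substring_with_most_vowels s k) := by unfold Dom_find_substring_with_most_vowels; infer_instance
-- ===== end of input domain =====

-- B replaces A's incremental sliding-window vowel counter with a plain per-window recount
-- of the slice s[i:i+k] (objective: simpler); same return value for every k ≥ 0.

-- ===== PORT A =====
def pvVowelSet : PySem.Set Char := PySem.Set.ofList ['a', 'e', 'i', 'o', 'u']

def pvStepA (cs : List Char) (k : Int) (st : Int × List Char × Int) (i : Int) : Int × List Char × Int :=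
  let vc : Int :=
    if i == 0 then
      (PySem.List.pyRange 0 k).foldl
        (fun a j => if pvVowelSet.contains (PySem.List.pyGetD cs j ' ') then a + 1 else a) st.2.2
    else
      let a := if pvVowelSet.contains (PySem.List.pyGetD cs (i - 1) ' ') then st.2.2 - 1 else st.2.2
      if pvVowelSet.contains (PySem.List.pyGetD cs (i + k - 1) ' ') then a + 1 else a
  if vc > st.1 then (vc, PySem.List.slice cs (some i) (some (i + k)), vc)
  else (st.1, st.2.1, vc)

def find_substring_with_most_vowels (s : String) (k : Int) : String :=
  let cs := s.toList
  let st := (PySem.List.pyRange 0 (PySem.List.len cs - k + 1)).foldl (pvStepA cs k) (0, [], 0)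
  if st.1 == 0 then "Not found!" else String.mk st.2.1

-- ===== PORT B =====
def pvStepB (cs : List Char) (k : Int) (st : Int × List Char) (i : Int) : Int × List Char :=
  let count : Int :=
    (PySem.List.slice cs (some i) (some (i + k))).foldl
      (fun a c => if ['a', 'e', 'i', 'o', 'u'].contains c then a + 1 else a) 0
  if count > st.1 then (count, PySem.List.slice cs (some i) (some (i + k))) else st

def find_substring_with_most_vowels_alt (s : String) (k : Int) : String :=
  let cs := s.toList
  let st := (PySem.List.pyRange 0 (PySem.List.len cs - k + 1)).foldl (pvStepB cs k) (0, [])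
  if st.1 > 0 then String.mk st.2 else "Not found!"

-- ===== PRECONDITION & SPEC =====
-- Pre_ excludes k < 0, on which A's index walk runs past the end of s and raises IndexError.
def Pre_find_substring_with_most_vowels (s : String) (k : Int) : Prop := 0 ≤ k
instance (s : String) (k : Int) : Decidable (Pre_find_substring_with_most_vowels s k) := by unfold Pre_find_substring_with_most_vowels; infer_instance
def pvWitness_find_substring_with_most_vowels : String × Int := ("hello", 3)

def Spec_find_substring_with_most_vowels (s : String) (k : Int) (out : String) : Prop := out = find_substring_with_most_vowels_alt s k
instance (s : String) (k : Int) (out : String) : Decidable (Spec_find_substring_with_most_vowels s k out) := by unfold Spec_find_substring_with_most_vowels; infer_instance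

-- ===== CLAIM (what is proved, stated in full; the proofs are below) =====
def Claim_equal_find_substring_with_most_vowels : Prop := ∀ (s : String) (k : Int), Dom_find_substring_with_most_vowels s k → Pre_find_substring_with_most_vowels s k → Spec_find_substring_with_most_vowels s k (find_substring_with_most_vowels s k)

-- ===== LEMMAS AND PROOFS =====

def pvVowel (c : Char) : Bool := ['a', 'e', 'i', 'o', 'u'].contains c

-- window vowel count, over Nat indices
def pvWC (cs : List Char) (K i : Nat) : Nat := ((cs.drop i).take K).countP pvVowel

lemma pvVowelSet_contains (c : Char) : pvVowelSet.contains c = pvVowel c := rfl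

lemma pvMap_getD_range (cs : List Char) (K : Nat) (hK : K ≤ cs.length) :
    (List.range K).map (fun j => cs.getD j ' ') = cs.take K := by
  apply List.ext_getElem
  · simp [hK]
  · intro i h1 h2
    simp at h1 ⊢
    rw [List.getElem?_eq_getElem (by omega)]
    simp

lemma pvInner_eq (cs : List Char) (k : Int) (hk : 0 ≤ k) (hK : k.toNat ≤ cs.length) :
    (PySem.List.pyRange 0 k).foldl
      (fun a j => if pvVowelSet.contains (PySem.List.pyGetD cs j ' ') then a + 1 else a) 0
      = (pvWC cs k.toNat 0 : Int) := by
  have hcast : k = (k.toNat : Int) := by omega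
  rw [hcast, PySem.List.pyRange_zero_natCast, List.foldl_map]
  simp only [PySem.List.pyGetD_natCast, pvVowelSet_contains]
  rw [PySem.List.foldl_count_if]
  simp only [pvWC, Int.toNat_natCast, List.drop_zero]
  rw [← pvMap_getD_range cs k.toNat hK, List.countP_map]
  simp only [Function.comp_def]
  simp [List.getD]

lemma pvSliceB_eq (cs : List Char) (k : Int) (hk : 0 ≤ k) (j : Nat) :
    PySem.List.slice cs (some (j : Int)) (some ((j : Int) + k)) = (cs.drop j).take k.toNat := by
  have : (j : Int) + k = ((j + k.toNat : Nat) : Int) := by omega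
  rw [this, PySem.List.slice_natCast]
  congr 1
  omega

lemma pvCountB_eq (cs : List Char) (k : Int) (hk : 0 ≤ k) (j : Nat) :
    (PySem.List.slice cs (some (j : Int)) (some ((j : Int) + k))).foldl
      (fun a c => if ['a', 'e', 'i', 'o', 'u'].contains c then a + 1 else a) 0
      = (pvWC cs k.toNat j : Int) := by
  rw [pvSliceB_eq cs k hk j]
  rw [PySem.List.foldl_count_if]
  simp only [pvWC, zero_add, Nat.cast_inj]
  rfl

lemma pvSlide (cs : List Char) (K j : Nat) (hj : 1 ≤ j) (hjk : j + K ≤ cs.length) :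
    (pvWC cs K j : Int)
      = (pvWC cs K (j - 1) : Int)
        - (if pvVowel (cs.getD (j - 1) ' ') then 1 else 0)
        + (if pvVowel (cs.getD (j - 1 + K) ' ') then 1 else 0) := by
  cases K with
  | zero =>
      simp [pvWC]
  | succ K' =>
      have hj1 : j - 1 < cs.length := by omega
      have hjK : j + K' < cs.length := by omega
      have hd : cs.drop (j - 1) = cs[j - 1] :: cs.drop j := by
        have hjj : j - 1 + 1 = j := by omega
        rw [List.drop_eq_getElem_cons hj1, hjj]
      have ht : (cs.drop j).take (K' + 1) = (cs.drop j).take K' ++ [cs[j + K']] := by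
        rw [List.take_add_one]
        congr 1
        rw [List.getElem?_drop, List.getElem?_eq_getElem (by omega)]
        rfl
      have h1 : cs.getD (j - 1) ' ' = cs[j - 1] := List.getD_eq_getElem cs ' ' hj1
      have h2 : cs.getD (j - 1 + (K' + 1)) ' ' = cs[j + K'] := by
        have : j - 1 + (K' + 1) = j + K' := by omega
        rw [this]
        exact List.getD_eq_getElem cs ' ' hjK
      simp only [pvWC, hd, ht, h1, h2, List.take_succ_cons, List.countP_cons, List.countP_append, List.countP_nil]
      split_ifs <;> push_cast <;> omega

-- the joint fold invariant
lemma pvInv (cs : List Char) (k : Int) (hk : 0 ≤ k) (j : Nat) (hj : 1 ≤ j)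
    (hjM : j + k.toNat ≤ cs.length + 1) :
    ∃ bc bs, 0 ≤ bc ∧
      ((List.range j).map (Nat.cast : Nat → Int)).foldl (pvStepA cs k) (0, [], 0)
        = (bc, bs, (pvWC cs k.toNat (j - 1) : Int)) ∧
      ((List.range j).map (Nat.cast : Nat → Int)).foldl (pvStepB cs k) (0, [])
        = (bc, bs) := by
  induction j, hj using Nat.le_induction with
  | base =>
      have hK : k.toNat ≤ cs.length := by omega
      simp only [List.range_one, List.map_cons, List.map_nil, List.foldl_cons, List.foldl_nil,
        Nat.cast_zero]
      rw [show pvStepA cs k (0, [], 0) 0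
            = (if (pvWC cs k.toNat 0 : Int) > 0
                then ((pvWC cs k.toNat 0 : Int), PySem.List.slice cs (some 0) (some (0 + k)),
                      (pvWC cs k.toNat 0 : Int))
                else (0, [], (pvWC cs k.toNat 0 : Int))) from by
            simp only [pvStepA, beq_self_eq_true, reduceIte, pvInner_eq cs k hk hK]]
      rw [show pvStepB cs k (0, []) 0
            = (if (pvWC cs k.toNat 0 : Int) > 0
                then ((pvWC cs k.toNat 0 : Int), PySem.List.slice cs (some 0) (some (0 + k)))
                else (0, [])) from by
            have := pvCountB_eq cs k hk 0
            simp only [Nat.cast_zero] at this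
            simp only [pvStepB, this]]
      by_cases h : (pvWC cs k.toNat 0 : Int) > 0
      · exact ⟨(pvWC cs k.toNat 0 : Int), PySem.List.slice cs (some 0) (some (0 + k)),
          le_of_lt h, by rw [if_pos h], by rw [if_pos h]⟩
      · exact ⟨0, [], le_refl 0, by rw [if_neg h], by rw [if_neg h]⟩
  | succ j hj ih =>
      have hjk : j + k.toNat ≤ cs.length := by omega
      obtain ⟨bc, bs, hbc, hA, hB⟩ := ih (by omega)
      simp only [List.range_succ, List.map_append, List.map_cons, List.map_nil,
        List.foldl_append, List.foldl_cons, List.foldl_nil, hA, hB]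
      have hne : ((j : Int) == 0) = false := by
        simp only [beq_eq_false_iff_ne, ne_eq, Nat.cast_eq_zero]
        omega
      have hi1 : (j : Int) - 1 = ((j - 1 : Nat) : Int) := by omega
      have hi2 : (j : Int) + k - 1 = ((j - 1 + k.toNat : Nat) : Int) := by omega
      have hvc : (let a := if pvVowelSet.contains (PySem.List.pyGetD cs ((j : Int) - 1) ' ')
                            then (pvWC cs k.toNat (j - 1) : Int) - 1
                            else (pvWC cs k.toNat (j - 1) : Int);
                  if pvVowelSet.contains (PySem.List.pyGetD cs ((j : Int) + k - 1) ' ')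
                    then a + 1 else a)
                  = (pvWC cs k.toNat ((j + 1) - 1) : Int) := by
        simp only [hi1, hi2, PySem.List.pyGetD_natCast, pvVowelSet_contains,
          Nat.add_sub_cancel]
        rw [pvSlide cs k.toNat j hj hjk]
        split_ifs <;> ring
      have hsA : pvStepA cs k (bc, bs, (pvWC cs k.toNat (j - 1) : Int)) (j : Int)
          = (if (pvWC cs k.toNat j : Int) > bc
              then ((pvWC cs k.toNat j : Int),
                    PySem.List.slice cs (some (j : Int)) (some ((j : Int) + k)),
                    (pvWC cs k.toNat j : Int))
              else (bc, bs, (pvWC cs k.toNat j : Int))) := by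
        simp only [pvStepA, hne, Bool.false_eq_true, reduceIte]
        simp only [Nat.add_sub_cancel] at hvc
        rw [hvc]
      have hsB : pvStepB cs k (bc, bs) (j : Int)
          = (if (pvWC cs k.toNat j : Int) > bc
              then ((pvWC cs k.toNat j : Int),
                    PySem.List.slice cs (some (j : Int)) (some ((j : Int) + k)))
              else (bc, bs)) := by
        simp only [pvStepB, pvCountB_eq cs k hk j]
      rw [hsA, hsB]
      simp only [Nat.add_sub_cancel]
      by_cases h : (pvWC cs k.toNat j : Int) > bc
      · exact ⟨(pvWC cs k.toNat j : Int),
          PySem.List.slice cs (some (j : Int)) (some ((j : Int) + k)),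
          le_of_lt (lt_of_le_of_lt hbc h), by rw [if_pos h], by rw [if_pos h]⟩
      · exact ⟨bc, bs, hbc, by rw [if_neg h], by rw [if_neg h]⟩

theorem pv_main (s : String) (k : Int) (hk : 0 ≤ k) :
    find_substring_with_most_vowels s k = find_substring_with_most_vowels_alt s k := by
  simp only [find_substring_with_most_vowels, find_substring_with_most_vowels_alt]
  set cs := s.toList with hcs
  rw [show PySem.List.len cs = (cs.length : Int) from rfl]
  by_cases hm : (cs.length : Int) - k + 1 ≤ 0
  · have hempty : PySem.List.pyRange 0 ((cs.length : Int) - k + 1) = [] := by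
      rw [List.eq_nil_iff_forall_not_mem]
      intro x hx
      rw [PySem.List.mem_pyRange_one] at hx
      omega
    simp [hempty]
  · have hM : (cs.length : Int) - k + 1 = ((((cs.length : Int) - k + 1).toNat : Nat) : Int) := by
      omega
    rw [hM, PySem.List.pyRange_zero_natCast]
    obtain ⟨bc, bs, hbc, hA, hB⟩ := pvInv cs k hk (((cs.length : Int) - k + 1).toNat)
      (by omega) (by omega)
    rw [hA, hB]
    by_cases h : bc = 0
    · simp [h]
    · have hgt : bc > 0 := lt_of_le_of_ne hbc (Ne.symm h)
      simp [h, hgt]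

-- ===== VERDICT (by name: the statement is the Claim_ definition above) =====
theorem find_substring_with_most_vowels_spec : Claim_equal_find_substring_with_most_vowels := by
  intro s k _ hpre
  unfold Spec_find_substring_with_most_vowels
  exact pv_main s k hpre
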